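-- pv_equiv track=rewrite | github.com/afcarl/HathiGenreTrainingset | BetterAligner.py | makesequence
-- ===== SOURCE A (Python) =====
-- def makesequence(filelines):
-- 	thispage = ""
-- 	pageseq = list()
--
-- 	for line in filelines:
-- 		if line.startswith("<pb>"):
-- 			if not "Estimated percentage of bad pages" in thispage:
-- 				pageseq.append(thispage)
-- 			thispage = ""
-- 		else:
-- 			thispage += line
-- 	if not "IMPLICIT PAGE NUMBER" in thispage and not "UNTYPICAL PAGE" in thispage:
-- 		pageseq.append(thispage)
--
-- 	return pageseq
-- ===== SOURCE B (Python) =====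
-- def makesequence(filelines):
--     # Partition lines into page groups at "<pb>" marker lines, join each group,
--     # then filter: intermediate pages by the bad-pages note, the final page by
--     # the implicit/untypical flags.
--     groups = [[]]
--     for line in filelines:
--         if line.startswith("<pb>"):
--             groups.append([])
--         else:
--             groups[-1].append(line)
--     pages = ["".join(g) for g in groups]
--     pageseq = [p for p in pages[:-1] if "Estimated percentage of bad pages" not in p]
--     last = pages[-1]
--     if "IMPLICIT PAGE NUMBER" not in last and "UNTYPICAL PAGE" not in last:
--         pageseq.append(last)
--     return pageseq
-- ===== Notes on version B (the rewrite author's own statement) =====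
-- stated objective: alternative
-- what changed: B replaces A's single accumulating flush-on-marker loop (filtering inline as it goes) with a split-then-filter pipeline: partition the lines into page groups at '<pb>' markers, join each group into a page string, then filter the intermediate pages and the final page separately.
import Mathlib
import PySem

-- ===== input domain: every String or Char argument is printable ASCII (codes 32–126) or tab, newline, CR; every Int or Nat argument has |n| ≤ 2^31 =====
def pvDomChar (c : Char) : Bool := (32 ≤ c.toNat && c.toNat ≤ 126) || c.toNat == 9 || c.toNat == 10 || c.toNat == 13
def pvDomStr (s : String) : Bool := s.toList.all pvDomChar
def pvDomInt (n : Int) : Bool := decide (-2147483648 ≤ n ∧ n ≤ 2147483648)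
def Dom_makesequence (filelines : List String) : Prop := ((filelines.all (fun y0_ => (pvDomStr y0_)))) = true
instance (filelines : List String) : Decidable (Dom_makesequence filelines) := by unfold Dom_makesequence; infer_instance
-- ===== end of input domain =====

-- B replaces A's accumulating flush-on-marker loop with a split-then-filter pipeline
-- (partition lines at '<pb>' markers, join each group, then filter pages); same cost.


-- ===== PORT A =====
-- thispage += line, ported through toList (exact)
def pvCat (a b : String) : String := String.ofList (a.toList ++ b.toList)

def makesequenceGo : List String → String → List String → List String
  | [], thispage, pageseq =>
      if !(PySem.Str.isIn "IMPLICIT PAGE NUMBER" thispage) && !(PySem.Str.isIn "UNTYPICAL PAGE" thispage)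
      then pageseq ++ [thispage] else pageseq
  | line :: rest, thispage, pageseq =>
      if PySem.Str.startswith line "<pb>" then
        makesequenceGo rest ""
          (if !(PySem.Str.isIn "Estimated percentage of bad pages" thispage)
           then pageseq ++ [thispage] else pageseq)
      else
        makesequenceGo rest (pvCat thispage line) pageseq

def makesequence (filelines : List String) : List String :=
  makesequenceGo filelines "" []

-- ===== PORT B =====
-- one step of B's partition loop; groups is never empty (starts as [[]])
def pvStep (groups : List (List String)) (line : String) : List (List String) :=
  if PySem.Str.startswith line "<pb>" then groups ++ [[]]
  else groups.dropLast ++ [(groups.getLast?.getD []) ++ [line]]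

def pvJoinAll (g : List String) : String := PySem.Str.join "" g

def pvOkMid (p : String) : Bool := !(PySem.Str.isIn "Estimated percentage of bad pages" p)

def pvOkLast (p : String) : Bool :=
  !(PySem.Str.isIn "IMPLICIT PAGE NUMBER" p) && !(PySem.Str.isIn "UNTYPICAL PAGE" p)

-- the filtering tail of Source B; pages is never empty, so pages[-1] is getLast?.getD ""
def pvFinish (pages : List String) : List String :=
  pages.dropLast.filter pvOkMid ++
    (if pvOkLast (pages.getLast?.getD "") then [pages.getLast?.getD ""] else [])

def makesequence_alt (filelines : List String) : List String :=
  pvFinish ((filelines.foldl pvStep [[]]).map pvJoinAll)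

-- ===== PRECONDITION & SPEC =====
def Spec_makesequence (filelines : List String) (out : List String) : Prop := out = makesequence_alt filelines
instance (filelines : List String) (out : List String) : Decidable (Spec_makesequence filelines out) := by unfold Spec_makesequence; infer_instance

-- ===== CLAIM (what is proved, stated in full; the proofs are below) =====
def Claim_equal_makesequence : Prop := ∀ (filelines : List String), Dom_makesequence filelines → Spec_makesequence filelines (makesequence filelines)

-- ===== LEMMAS AND PROOFS =====

-- reference recursion: A's loop with the accumulator factored out
def pvRef : List String → String → List String
  | [], cur => if pvOkLast cur then [cur] else []
  | l :: rest, cur =>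
      if PySem.Str.startswith l "<pb>" then
        (if pvOkMid cur then cur :: pvRef rest "" else pvRef rest "")
      else pvRef rest (pvCat cur l)

lemma go_eq_ref (lines : List String) : ∀ (cur : String) (acc : List String),
    makesequenceGo lines cur acc = acc ++ pvRef lines cur := by
  induction lines with
  | nil =>
    intro cur acc
    simp only [makesequenceGo, pvRef, pvOkLast]
    split_ifs <;> simp
  | cons l rest ih =>
    intro cur acc
    simp only [makesequenceGo, pvRef, pvOkMid]
    split_ifs <;> simp [ih]

-- B's partition recursion with explicit current group
def pvSegsFrom : List String → List String → List (List String)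
  | [], cur => [cur]
  | l :: rest, cur =>
      if PySem.Str.startswith l "<pb>" then cur :: pvSegsFrom rest []
      else pvSegsFrom rest (cur ++ [l])

lemma segsFrom_ne_nil (lines : List String) : ∀ cur, pvSegsFrom lines cur ≠ [] := by
  induction lines with
  | nil => intro cur; simp [pvSegsFrom]
  | cons l rest ih => intro cur; simp only [pvSegsFrom]; split_ifs <;> simp [ih]

lemma foldl_pvStep_eq (lines : List String) :
    ∀ (init : List (List String)) (cur : List String),
    List.foldl pvStep (init ++ [cur]) lines = init ++ pvSegsFrom lines cur := by
  induction lines with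
  | nil => intro init cur; simp [pvSegsFrom]
  | cons l rest ih =>
    intro init cur
    simp only [List.foldl_cons, pvStep, pvSegsFrom]
    split_ifs with h
    · rw [ih (init ++ [cur]) []]
      simp
    · rw [List.dropLast_concat, List.getLast?_concat]
      simpa using ih init (cur ++ [l])

lemma joinAll_nil : pvJoinAll [] = "" := rfl

lemma joinAll_concat (g : List String) (l : String) :
    pvJoinAll (g ++ [l]) = pvCat (pvJoinAll g) l := by
  have key : ∀ (xs : List (List Char)) (y : List Char),
      PySem.Chars.join [] (xs ++ [y]) = PySem.Chars.join [] xs ++ y := by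
    intro xs y
    induction xs with
    | nil => simp [PySem.Chars.join_nil, PySem.Chars.join_singleton]
    | cons a as ih =>
      cases as with
      | nil => simp [PySem.Chars.join_singleton, PySem.Chars.join_cons_cons]
      | cons b bs =>
        simp only [List.cons_append, PySem.Chars.join_cons_cons]
        simpa using ih
  simp only [pvJoinAll, pvCat, PySem.Str.join]
  rw [String.toList_ofList]
  simp only [List.map_append, List.map_cons, List.map_nil]
  rw [key, String.toList_ofList]

lemma finish_cons (a : String) (ps : List String) (h : ps ≠ []) :
    pvFinish (a :: ps) = (if pvOkMid a then [a] else []) ++ pvFinish ps := by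
  cases ps with
  | nil => exact absurd rfl h
  | cons b bs =>
    simp only [pvFinish, List.dropLast_cons₂, List.filter_cons, List.getLast?_cons_cons]
    split_ifs <;> simp

lemma ref_eq_finish (lines : List String) : ∀ (cur : List String),
    pvRef lines (pvJoinAll cur) = pvFinish ((pvSegsFrom lines cur).map pvJoinAll) := by
  induction lines with
  | nil =>
    intro cur
    simp only [pvRef, pvSegsFrom, List.map_cons, List.map_nil, pvFinish]
    split_ifs <;> simp_all
  | cons l rest ih =>
    intro cur
    by_cases h : PySem.Str.startswith l "<pb>" = true
    · simp only [pvRef, pvSegsFrom, if_pos h, List.map_cons]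
      rw [finish_cons _ _ (by simp [segsFrom_ne_nil]), ← joinAll_nil, ih []]
      split_ifs <;> simp
    · simp only [pvRef, pvSegsFrom, if_neg h]
      rw [← joinAll_concat, ih (cur ++ [l])]

-- ===== VERDICT (by name: the statement is the Claim_ definition above) =====
theorem makesequence_spec : Claim_equal_makesequence := by
  intro filelines _
  show makesequence filelines = makesequence_alt filelines
  rw [makesequence, makesequence_alt, go_eq_ref, List.nil_append,
    show ([[]] : List (List String)) = [] ++ [[]] from rfl, foldl_pvStep_eq,
    List.nil_append, ← joinAll_nil, ref_eq_finish]
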